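-- pv_equiv track=rewrite | github.com/MostafaAhmed98/Problem_Solving | Smallest_pair.py | smallest_pair
-- ===== SOURCE A (Python) =====
-- def smallest_pair(lst):
--     min_value = None
--     for pos1, item1 in enumerate(lst):
--         for pos2 in range(pos1+1, len(lst)):
--             item2 = lst[pos2]
--             cur = item1 + item2 + pos2 - pos1
--             if min_value is None or min_value > cur:
--                 min_value = cur
--     return min_value
-- ===== SOURCE B (Python) =====
-- def smallest_pair(lst):
--     # single pass: lst[i]+lst[j]+j-i = (lst[i]-i) + (lst[j]+j); track min of (item-pos) so far
--     best_prev = None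
--     result = None
--     for pos, item in enumerate(lst):
--         if best_prev is not None:
--             cur = best_prev + item + pos
--             if result is None or cur < result:
--                 result = cur
--         d = item - pos
--         if best_prev is None or d < best_prev:
--             best_prev = d
--     return result
-- ===== Notes on version B (the rewrite author's own statement) =====
-- stated objective: faster
-- what changed: Replaced the O(n^2) all-pairs scan by a single pass that exploits lst[i]+lst[j]+j-i = (lst[i]-i)+(lst[j]+j), keeping a running minimum of item-pos over earlier positions.
import Mathlib
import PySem

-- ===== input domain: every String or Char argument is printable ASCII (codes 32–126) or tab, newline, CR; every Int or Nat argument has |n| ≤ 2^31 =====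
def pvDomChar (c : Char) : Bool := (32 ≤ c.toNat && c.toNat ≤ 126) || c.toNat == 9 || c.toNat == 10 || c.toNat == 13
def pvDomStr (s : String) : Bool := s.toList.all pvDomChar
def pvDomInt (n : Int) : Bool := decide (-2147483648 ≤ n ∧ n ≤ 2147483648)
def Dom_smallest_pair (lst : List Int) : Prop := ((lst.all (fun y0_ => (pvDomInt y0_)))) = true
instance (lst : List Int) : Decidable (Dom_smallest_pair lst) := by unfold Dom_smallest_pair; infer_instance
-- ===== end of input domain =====

-- B replaces A's O(n^2) all-pairs scan by one pass keeping the running min of item-pos (objective: faster).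

-- ===== PORT A =====
-- literal transliteration of A: outer loop over enumerate, inner loop over range(pos1+1, len),
-- lst[pos2] via pyGet? (the none branch is Python's IndexError path, unreachable here).
def smallest_pair (lst : List Int) : Option Int :=
  (PySem.List.enumerate lst).foldl
    (fun min_value p =>
      let pos1 := p.1
      let item1 := p.2
      (PySem.List.pyRange (pos1 + 1) (lst.length : Int) 1).foldl
        (fun min_value pos2 =>
          match PySem.List.pyGet? lst pos2 with
          | none => min_value  -- IndexError: never reached for pos2 in range
          | some item2 =>
            let cur := item1 + item2 + pos2 - pos1
            match min_value with
            | none => some cur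
            | some m => if m > cur then some cur else some m)
        min_value)
    none

-- ===== PORT B =====
-- literal transliteration of Source B: single pass with state (best_prev, result); bstep is the loop body
def bstep (st : Option Int × Option Int) (p : Int × Int) : Option Int × Option Int :=
  let best_prev := st.1
  let result := st.2
  let pos := p.1
  let item := p.2
  let result' :=
    match best_prev with
    | none => result
    | some b =>
      let cur := b + item + pos
      match result with
      | none => some cur
      | some r => if cur < r then some cur else some r
  let d := item - pos
  let best_prev' :=
    match best_prev with
    | none => some d
    | some b => if d < b then some d else some b
  (best_prev', result')

def smallest_pair_alt (lst : List Int) : Option Int :=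
  ((PySem.List.enumerate lst).foldl bstep (none, none)).2

-- ===== PRECONDITION & SPEC =====
def Spec_smallest_pair (lst : List Int) (out : Option Int) : Prop := out = smallest_pair_alt lst
instance (lst : List Int) (out : Option Int) : Decidable (Spec_smallest_pair lst out) := by unfold Spec_smallest_pair; infer_instance

-- ===== CLAIM (what is proved, stated in full; the proofs are below) =====
def Claim_equal_smallest_pair : Prop := ∀ (lst : List Int), Dom_smallest_pair lst → Spec_smallest_pair lst (smallest_pair lst)

-- ===== LEMMAS AND PROOFS =====

-- running-min update on Option Int, and min of two Option Int (none = "no value yet")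
def omin (o : Option Int) (x : Int) : Option Int :=
  some (match o with | none => x | some m => min m x)

def omerge (o q : Option Int) : Option Int :=
  match o, q with
  | o, none => o
  | none, q => q
  | some a, some b => some (min a b)

def M (xs : List Int) : Option Int := xs.foldl omin none

theorem omerge_none_right (o : Option Int) : omerge o none = o := by cases o <;> rfl

theorem omin_eq_omerge (o : Option Int) (x : Int) : omin o x = omerge o (some x) := by
  cases o <;> rfl

theorem omerge_assoc (a b c : Option Int) :
    omerge (omerge a b) c = omerge a (omerge b c) := by
  cases a <;> cases b <;> cases c <;> simp [omerge, min_assoc]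

theorem omerge_swap (a b c d : Option Int) :
    omerge (omerge a b) (omerge c d) = omerge (omerge a c) (omerge b d) := by
  cases a <;> cases b <;> cases c <;> cases d <;>
    simp [omerge, min_comm, min_left_comm]

theorem foldl_omin_eq (xs : List Int) : ∀ o, xs.foldl omin o = omerge o (M xs) := by
  induction xs with
  | nil => intro o; simp [M, List.foldl_nil, omerge_none_right]
  | cons x t ih =>
    intro o
    have hM : M (x :: t) = omerge (some x) (M t) := by
      show List.foldl omin (omin none x) t = _
      rw [show omin none x = some x from rfl, ih]
    rw [List.foldl_cons, ih, hM, omin_eq_omerge, omerge_assoc]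

theorem M_append (xs ys : List Int) : M (xs ++ ys) = omerge (M xs) (M ys) := by
  simp [M, List.foldl_append, foldl_omin_eq ys (xs.foldl omin none)]

theorem M_singleton (x : Int) : M [x] = some x := rfl

theorem M_cons (x : Int) (xs : List Int) : M (x :: xs) = omerge (some x) (M xs) := by
  have := M_append [x] xs
  simpa using this

theorem M_map_add (xs : List Int) (c : Int) :
    M (xs.map (fun y => y + c)) = (M xs).map (fun y => y + c) := by
  induction xs with
  | nil => rfl
  | cons x t ih =>
    rw [List.map_cons, M_cons, M_cons, ih]
    cases M t with
    | none => rfl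
    | some m =>
      simp only [omerge, Option.map_some]
      congr 1
      rcases le_total x m with h | h
      · rw [min_eq_left h, min_eq_left (by omega)]
      · rw [min_eq_right h, min_eq_right (by omega)]

-- min over "each row plus one extra element" = min over rows merged with min over extras
theorem M_flatMap_snoc {α : Type} (l : List α) (f : α → List Int) (g : α → Int) :
    M (l.flatMap (fun p => f p ++ [g p])) = omerge (M (l.flatMap f)) (M (l.map g)) := by
  induction l with
  | nil => rfl
  | cons a t ih =>
    rw [List.flatMap_cons, List.flatMap_cons, List.map_cons,
        M_append, M_append, M_append, M_singleton, ih, M_cons, omerge_swap]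

-- the candidate values contributed by outer index i with value a
def candRow (lst : List Int) (i a : Int) : List Int :=
  (PySem.List.pyRange (i + 1) (lst.length : Int) 1).map
    (fun j => a + PySem.List.pyGetD lst j 0 + j - i)

def cand (lst : List Int) : List Int :=
  (PySem.List.enumerate lst).flatMap (fun p => candRow lst p.1 p.2)

def diffs (lst : List Int) : List Int :=
  (PySem.List.enumerate lst).map (fun p => p.2 - p.1)

-- A computes M (cand lst)
theorem smallest_pair_eq_M_cand (lst : List Int) : smallest_pair lst = M (cand lst) := by
  have hfold : ∀ (l : List (Int × Int)) (o : Option Int),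
      l.foldl (fun mv p => (candRow lst p.1 p.2).foldl omin mv) o
        = (l.flatMap (fun p => candRow lst p.1 p.2)).foldl omin o := by
    intro l
    induction l with
    | nil => intro o; rfl
    | cons a t ih => intro o; rw [List.foldl_cons, List.flatMap_cons, List.foldl_append, ih]
  have hinner : ∀ (i a : Int), 0 ≤ i →
      (PySem.List.pyRange (i + 1) (lst.length : Int) 1).foldl
        (fun min_value pos2 =>
          match PySem.List.pyGet? lst pos2 with
          | none => min_value
          | some item2 =>
            let cur := a + item2 + pos2 - i
            match min_value with
            | none => some cur
            | some m => if m > cur then some cur else some m) =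
        fun o => (candRow lst i a).foldl omin o := by
    intro i a hi
    funext o
    rw [candRow, List.foldl_map]
    refine PySem.List.foldl_congr_mem _ _ _ o (fun mv j hj => ?_)
    have hjr := (PySem.List.mem_pyRange_one).1 hj
    have h0 : (0:Int) ≤ j := by omega
    have hlt : j < (lst.length : Int) := hjr.2
    rw [PySem.List.pyGet?_eq_some_getElem lst h0 hlt,
        PySem.List.pyGetD_eq_getElem lst 0 h0 hlt]
    cases mv with
    | none => rfl
    | some m =>
      simp only [omin]
      rcases lt_or_ge (a + lst[j.toNat] + j - i) m with h | h
      · rw [if_pos (by omega), min_eq_right (by omega)]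
      · rw [if_neg (by omega), min_eq_left (by omega)]
  rw [smallest_pair, cand, M, ← hfold]
  refine PySem.List.foldl_congr_mem _ _ _ none (fun mv p hp => ?_)
  obtain ⟨k, hk, rfl⟩ := (PySem.List.mem_enumerate_iff _ _ _).1 hp
  have := hinner (0 + (k : Int)) lst[k] (by omega)
  simpa using congrFun this mv

-- decomposing cand over a snoc
theorem cand_snoc (l : List Int) (x : Int) :
    cand (l ++ [x]) =
      (PySem.List.enumerate l).flatMap
        (fun p => candRow l p.1 p.2 ++ [(p.2 - p.1) + (x + (l.length : Int))]) := by
  rw [cand, PySem.List.enumerate_append, List.flatMap_append]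
  have htail :
      (PySem.List.enumerate [x] (0 + (l.length : Int))).flatMap
        (fun p => candRow (l ++ [x]) p.1 p.2) = [] := by
    simp only [PySem.List.enumerate_cons, PySem.List.enumerate_nil, List.flatMap_cons,
      List.flatMap_nil, List.append_nil]
    rw [candRow, PySem.List.pyRange_one_eq_nil (by simp)]
    rfl
  rw [htail, List.append_nil]
  apply List.flatMap_congr
  intro p hp
  obtain ⟨k, hk, rfl⟩ := (PySem.List.mem_enumerate_iff _ _ _).1 hp
  simp only [zero_add]
  rw [candRow, candRow]
  have hsplit : PySem.List.pyRange ((k : Int) + 1) (((l ++ [x]).length : Int)) 1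
      = PySem.List.pyRange ((k : Int) + 1) (l.length : Int) 1 ++ [(l.length : Int)] := by
    have h : (((l ++ [x]).length : Int)) = (l.length : Int) + 1 := by simp
    rw [h, PySem.List.pyRange_one_succ_right (by omega)]
  rw [hsplit, List.map_append]
  congr 1
  · refine List.map_congr_left (fun j hj => ?_)
    have hjr := (PySem.List.mem_pyRange_one).1 hj
    have h0 : (0:Int) ≤ j := by omega
    have hlt : j < (l.length : Int) := hjr.2
    rw [PySem.List.pyGetD_eq_getElem _ 0 h0 (by simp; omega),
        PySem.List.pyGetD_eq_getElem _ 0 h0 hlt]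
    have hj2 : j.toNat < l.length := by omega
    rw [List.getElem_append_left hj2]
  · simp only [List.map_cons, List.map_nil]
    have hx : PySem.List.pyGetD (l ++ [x]) (l.length : Int) 0 = x := by
      rw [PySem.List.pyGetD_eq_getElem _ 0 (by omega) (by simp)]
      simp
    rw [hx]
    congr 1
    ring

theorem diffs_snoc (l : List Int) (x : Int) :
    diffs (l ++ [x]) = diffs l ++ [x - (l.length : Int)] := by
  rw [diffs, PySem.List.enumerate_append, List.map_append, diffs]
  simp [PySem.List.enumerate_cons]

-- B's loop invariant: state = (min of diffs so far, min of pair candidates so far)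
theorem bfold_eq (l : List Int) :
    (PySem.List.enumerate l).foldl bstep (none, none) = (M (diffs l), M (cand l)) := by
  induction l using List.reverseRecOn with
  | nil => rfl
  | append_singleton l x ih =>
    rw [PySem.List.enumerate_append, List.foldl_append, ih]
    rw [show PySem.List.enumerate [x] (0 + (l.length : Int))
          = [(0 + (l.length : Int), x)] by simp [PySem.List.enumerate_cons]]
    rw [List.foldl_cons, List.foldl_nil]
    simp only [zero_add]
    rw [diffs_snoc, cand_snoc, M_append, M_singleton,
        M_flatMap_snoc (PySem.List.enumerate l) (fun p => candRow l p.1 p.2)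
          (fun p => (p.2 - p.1) + (x + (l.length : Int)))]
    rw [show (PySem.List.enumerate l).map (fun p => (p.2 - p.1) + (x + (l.length : Int)))
          = (diffs l).map (fun y => y + (x + (l.length : Int))) by
        rw [diffs, List.map_map]; rfl]
    rw [M_map_add]
    rw [show cand l = (PySem.List.enumerate l).flatMap (fun p => candRow l p.1 p.2) from rfl]
    cases hd : M (diffs l) with
    | none =>
      simp only [bstep, Option.map_none, omerge_none_right]
      rfl
    | some b =>
      simp only [bstep, Option.map_some]
      rw [Prod.mk.injEq]
      refine ⟨?_, ?_⟩
      · show (if x - (l.length : Int) < b then some (x - (l.length : Int)) else some b)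
          = omerge (some b) (some (x - (l.length : Int)))
        simp only [omerge]
        split_ifs with h
        · rw [min_eq_right (by omega)]
        · rw [min_eq_left (by omega)]
      · cases hr : M ((PySem.List.enumerate l).flatMap fun p => candRow l p.1 p.2) with
        | none =>
          simp only [omerge]
          congr 1
          ring
        | some r =>
          simp only [omerge]
          split_ifs with h
          · rw [min_eq_right (by omega)]
            congr 1
            ring
          · rw [min_eq_left (by omega)]

-- ===== VERDICT (by name: the statement is the Claim_ definition above) =====
theorem smallest_pair_spec : Claim_equal_smallest_pair := by
  intro lst _
  show smallest_pair lst = smallest_pair_alt lst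
  rw [smallest_pair_eq_M_cand, smallest_pair_alt, bfold_eq]
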